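-- pv_equiv track=rewrite | github.com/GregSym/Numberphile_Follow_Alongs | src/numberphile_common_tools/patterns/hitomezashi_stitch_pattern.py | _vector_grid_general
-- ===== SOURCE A (Python) =====
-- def _vector_grid_general(
--     index_side: list[int], magnitude_side: list[int]
-- ) -> dict[int, list[tuple[int, int]]]:
--     """returns vectors for either of 2 dimensions in the hitomezashi pattern
--     - this means the vectors are naturally 1D vectors in either the x or y direction
--     """
--     vector_map: dict[int, list[tuple[int, int]]] = {}
--     for index, bit in enumerate(index_side):
--         vector_map[index] = []
--         for index_value_pair, index_value_pair1 in zip(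
--             enumerate(magnitude_side), list(enumerate(magnitude_side))[1:]
--         ):
--             if bit == 1:
--                 if index_value_pair[0] % 2 == 0 and index_value_pair1[0] % 2 == 1:
--                     vector_map[index].append(
--                         (index_value_pair[0], index_value_pair1[0])
--                     )
--             else:
--                 if index_value_pair[0] % 2 == 1 and index_value_pair1[0] % 2 == 0:
--                     vector_map[index].append(
--                         (index_value_pair[0], index_value_pair1[0])
--                     )
--     return vector_map
-- ===== SOURCE B (Python) =====
-- def _vector_grid_general(
--     index_side: list[int], magnitude_side: list[int]
-- ) -> dict[int, list[tuple[int, int]]]: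
--     """Precompute the even-start and odd-start pair lists once; each index just
--     picks one of them by its bit value."""
--     m = len(magnitude_side)
--     evens = [(i, i + 1) for i in range(m - 1) if i % 2 == 0]
--     odds = [(i, i + 1) for i in range(m - 1) if i % 2 == 1]
--     return {index: (evens if bit == 1 else odds) for index, bit in enumerate(index_side)}
-- ===== Notes on version B (the rewrite author's own statement) =====
-- stated objective: faster
-- what changed: A re-scans magnitude_side with the parity test for every index; B computes the even-start and odd-start pair lists once from len(magnitude_side) and each index just picks one of the two by its bit value.
import Mathlib
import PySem

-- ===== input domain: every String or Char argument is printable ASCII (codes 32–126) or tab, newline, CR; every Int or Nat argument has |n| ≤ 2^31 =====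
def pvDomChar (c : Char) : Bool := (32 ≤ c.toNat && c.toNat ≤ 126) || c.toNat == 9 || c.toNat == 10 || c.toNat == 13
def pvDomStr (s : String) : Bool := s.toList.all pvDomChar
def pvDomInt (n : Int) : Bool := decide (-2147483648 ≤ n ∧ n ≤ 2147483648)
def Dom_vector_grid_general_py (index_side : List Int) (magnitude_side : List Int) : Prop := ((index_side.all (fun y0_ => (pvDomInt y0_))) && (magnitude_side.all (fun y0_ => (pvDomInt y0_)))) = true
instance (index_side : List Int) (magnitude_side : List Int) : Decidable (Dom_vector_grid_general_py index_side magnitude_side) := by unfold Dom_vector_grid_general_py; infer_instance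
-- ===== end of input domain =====

-- B precomputes the two parity-selected pair lists once and assigns one per index (O(n+m) work vs A's O(n·m)).


-- ===== PORT A =====
-- one inner-loop iteration of A: conditional append into vector_map[index]
-- ('%' on Int is exact for the Python here: both operands are nonnegative enumerate indices, divisor 2 > 0)
def pvStepA (index bit : Int) (d : PySem.Dict Int (List (Int × Int)))
    (q : (Int × Int) × (Int × Int)) : PySem.Dict Int (List (Int × Int)) :=
  if bit == 1 then
    if q.1.1 % 2 == 0 && q.2.1 % 2 == 1 then
      d.modify index [] (fun l => l ++ [(q.1.1, q.2.1)])
    else d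
  else
    if q.1.1 % 2 == 1 && q.2.1 % 2 == 0 then
      d.modify index [] (fun l => l ++ [(q.1.1, q.2.1)])
    else d

def vector_grid_general_py (index_side : List Int) (magnitude_side : List Int) : List (Int × List (Int × Int)) :=
  ((PySem.List.enumerate index_side 0).foldl
    (fun d p =>
      ((PySem.List.enumerate magnitude_side 0).zip
          (PySem.List.slice (PySem.List.enumerate magnitude_side 0) (some 1) none)).foldl
        (pvStepA p.1 p.2) (d.insert p.1 ([] : List (Int × Int))))
    PySem.Dict.empty).items

-- ===== PORT B =====
def vector_grid_general_py_alt (index_side : List Int) (magnitude_side : List Int) : List (Int × List (Int × Int)) :=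
  let m : Int := magnitude_side.length
  let evens := ((PySem.List.pyRange 0 (m - 1) 1).filter (fun i => i % 2 == 0)).map (fun i => (i, i + 1))
  let odds := ((PySem.List.pyRange 0 (m - 1) 1).filter (fun i => i % 2 == 1)).map (fun i => (i, i + 1))
  (PySem.List.enumerate index_side 0).map (fun p => (p.1, if p.2 == 1 then evens else odds))

-- ===== PRECONDITION & SPEC =====
def Spec_vector_grid_general_py (index_side : List Int) (magnitude_side : List Int) (out : List (Int × List (Int × Int))) : Prop := out = vector_grid_general_py_alt index_side magnitude_side
instance (index_side : List Int) (magnitude_side : List Int) (out : List (Int × List (Int × Int))) : Decidable (Spec_vector_grid_general_py index_side magnitude_side out) := by unfold Spec_vector_grid_general_py; infer_instance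

-- ===== CLAIM (what is proved, stated in full; the proofs are below) =====
def Claim_equal_vector_grid_general_py : Prop := ∀ (index_side : List Int) (magnitude_side : List Int), Dom_vector_grid_general_py index_side magnitude_side → Spec_vector_grid_general_py index_side magnitude_side (vector_grid_general_py index_side magnitude_side)

-- ===== LEMMAS AND PROOFS =====

-- generic: folding "append (i, i+1) when c i (i+1)" over zip(enumerate xs s, its tail)
-- is appending the filtered range of consecutive index pairs
theorem pvZipFold (c : Int → Int → Bool) (xs : List Int) (s : Int) (acc : List (Int × Int)) :
    ((PySem.List.enumerate xs s).zip (PySem.List.enumerate xs s).tail).foldl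
        (fun l q => if c q.1.1 q.2.1 then l ++ [(q.1.1, q.2.1)] else l) acc
      = acc ++ ((PySem.List.pyRange s (s + xs.length - 1) 1).filter
          (fun i => c i (i + 1))).map (fun i => (i, i + 1)) := by
  induction xs generalizing s acc with
  | nil =>
      simp [PySem.List.enumerate]
  | cons x xs ih =>
    cases xs with
    | nil =>
        simp [PySem.List.enumerate]
    | cons y ys =>
      rw [PySem.List.enumerate_cons]
      have htl : ((s, x) :: PySem.List.enumerate (y :: ys) (s + 1)).tail
          = PySem.List.enumerate (y :: ys) (s + 1) := rfl
      rw [htl]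
      have hzip : ((s, x) :: PySem.List.enumerate (y :: ys) (s + 1)).zip
            (PySem.List.enumerate (y :: ys) (s + 1))
          = ((s, x), (s + 1, y)) :: ((PySem.List.enumerate (y :: ys) (s + 1)).zip
              (PySem.List.enumerate (y :: ys) (s + 1)).tail) := by
        rw [PySem.List.enumerate_cons]; rfl
      rw [hzip, List.foldl_cons]
      rw [ih (s + 1)]
      have hrange : PySem.List.pyRange s (s + ((x :: y :: ys : List Int).length : Int) - 1) 1
          = s :: PySem.List.pyRange (s + 1) (s + 1 + ((y :: ys : List Int).length : Int) - 1) 1 := by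
        rw [PySem.List.pyRange_one_cons (by simp; omega)]
        congr 2
        simp; omega
      rw [hrange, List.filter_cons]
      by_cases h : c s (s + 1) = true <;> simp [h]

-- A's inner loop only ever touches key k: it is one insert of a pure list fold
theorem pvDictFold (k : Int) (c : ((Int × Int) × (Int × Int)) → Bool)
    (zs : List ((Int × Int) × (Int × Int)))
    (d : PySem.Dict Int (List (Int × Int))) (v : List (Int × Int)) :
    zs.foldl (fun d q => if c q then d.modify k [] (fun l => l ++ [(q.1.1, q.2.1)]) else d) (d.insert k v)
      = d.insert k (zs.foldl (fun l q => if c q then l ++ [(q.1.1, q.2.1)] else l) v) := by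
  induction zs generalizing v with
  | nil => rfl
  | cons q zs ih =>
    simp only [List.foldl_cons, PySem.Dict.modify,
      PySem.Dict.getD_insert_self, PySem.Dict.insert_insert_self]
    split_ifs <;> exact ih _

theorem pvStepA_eq (k bit : Int) :
    pvStepA k bit = fun d q =>
      if (if bit == 1 then q.1.1 % 2 == 0 && q.2.1 % 2 == 1
          else q.1.1 % 2 == 1 && q.2.1 % 2 == 0) then
        d.modify k [] (fun l => l ++ [(q.1.1, q.2.1)]) else d := by
  funext d q
  simp only [pvStepA]
  by_cases h : (bit == 1) = true <;> simp [h]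

-- the list of pairs A collects for a stitch of value `bit`
def pvPairs (magnitude_side : List Int) (bit : Int) : List (Int × Int) :=
  ((PySem.List.enumerate magnitude_side 0).zip
      (PySem.List.slice (PySem.List.enumerate magnitude_side 0) (some 1) none)).foldl
    (fun l q => if (if bit == 1 then q.1.1 % 2 == 0 && q.2.1 % 2 == 1
          else q.1.1 % 2 == 1 && q.2.1 % 2 == 0) then l ++ [(q.1.1, q.2.1)] else l) []

-- A's pairs are exactly B's parity-filtered pairs
theorem pvPairs_eq (magnitude_side : List Int) (bit : Int) :
    pvPairs magnitude_side bit
      = if bit == 1 then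
          ((PySem.List.pyRange 0 ((magnitude_side.length : Int) - 1) 1).filter
            (fun i => i % 2 == 0)).map (fun i => (i, i + 1))
        else
          ((PySem.List.pyRange 0 ((magnitude_side.length : Int) - 1) 1).filter
            (fun i => i % 2 == 1)).map (fun i => (i, i + 1)) := by
  unfold pvPairs
  rw [PySem.List.slice_from_one]
  by_cases h : (bit == 1) = true <;>
    simp only [h, if_true, if_false, Bool.false_eq_true]
  · rw [pvZipFold (fun i j => i % 2 == 0 && j % 2 == 1)]
    simp only [List.nil_append, zero_add]
    congr 1
    apply List.filter_congr
    intro i _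
    have h1 : i % 2 = 0 ∨ i % 2 = 1 := by omega
    rcases h1 with h1 | h1 <;>
      · have h2 : (i + 1) % 2 = 1 - i % 2 := by omega
        simp [h1, h2]
  · rw [pvZipFold (fun i j => i % 2 == 1 && j % 2 == 0)]
    simp only [List.nil_append, zero_add]
    congr 1
    apply List.filter_congr
    intro i _
    have h1 : i % 2 = 0 ∨ i % 2 = 1 := by omega
    rcases h1 with h1 | h1 <;>
      · have h2 : (i + 1) % 2 = 1 - i % 2 := by omega
        simp [h1, h2]

-- the outer loop: fresh keys append in order
theorem pvOuterFold (magnitude_side : List Int) (l : List Int) (s : Int)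
    (d : PySem.Dict Int (List (Int × Int))) (hd : ∀ j, s ≤ j → d.contains j = false) :
    ((PySem.List.enumerate l s).foldl
      (fun d p =>
        ((PySem.List.enumerate magnitude_side 0).zip
            (PySem.List.slice (PySem.List.enumerate magnitude_side 0) (some 1) none)).foldl
          (pvStepA p.1 p.2) (d.insert p.1 ([] : List (Int × Int)))) d).items
      = d.items ++ (PySem.List.enumerate l s).map (fun p => (p.1, pvPairs magnitude_side p.2)) := by
  induction l generalizing s d with
  | nil => simp [PySem.List.enumerate]
  | cons x xs ih =>
    rw [PySem.List.enumerate_cons, List.foldl_cons, List.map_cons]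
    dsimp only
    rw [pvStepA_eq, pvDictFold]
    rw [show (((PySem.List.enumerate magnitude_side 0).zip
          (PySem.List.slice (PySem.List.enumerate magnitude_side 0) (some 1) none)).foldl
        (fun l q => if (if x == 1 then q.1.1 % 2 == 0 && q.2.1 % 2 == 1
            else q.1.1 % 2 == 1 && q.2.1 % 2 == 0) then l ++ [(q.1.1, q.2.1)] else l) [])
        = pvPairs magnitude_side x from rfl]
    rw [ih (s + 1) _ (by
      intro j hj
      rw [PySem.Dict.contains_insert]
      have : (j == s) = false := by simp; omega
      rw [this, Bool.false_or]
      exact hd j (by omega))]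
    have hins : (d.insert s (pvPairs magnitude_side x)).items
        = d.items ++ [(s, pvPairs magnitude_side x)] := by
      simp [PySem.Dict.insert, hd s le_rfl]
    rw [hins, List.append_assoc]
    rfl

-- ===== VERDICT (by name: the statement is the Claim_ definition above) =====
theorem vector_grid_general_py_spec : Claim_equal_vector_grid_general_py := by
  intro index_side magnitude_side _
  unfold Spec_vector_grid_general_py vector_grid_general_py vector_grid_general_py_alt
  rw [pvOuterFold magnitude_side index_side 0 PySem.Dict.empty (by intro j _; rfl)]
  simp only [PySem.Dict.empty, List.nil_append]
  apply List.map_congr_left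
  intro p _
  rw [pvPairs_eq]
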